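-- pv_equiv track=rewrite | github.com/chandan789maity/Plagiarism-Checker- | Plagiarism checker/plagarism.py | find_max_url
-- ===== SOURCE A (Python) =====
-- def find_max_url(ans, url):
--     mx = 0
--     count = -1
--     url_ans = ""
--     for x in ans:
--         count += 1
--         for y in x:
--             if y > mx:
--                 mx = y
--                 url_ans = url[count]
--
--     return mx, url_ans
-- ===== SOURCE B (Python) =====
-- def find_max_url(ans, url):
--     # Two-pass decomposition: first a table of per-row maxima, then one
--     # selection pass over that table.
--     row_max = [max(row, default=0) for row in ans]
--     mx = 0
--     url_ans = ""
--     for i, m in enumerate(row_max):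
--         if m > mx:
--             mx = m
--             url_ans = url[i]
--     return mx, url_ans
-- ===== Notes on version B (the rewrite author's own statement) =====
-- stated objective: alternative
-- what changed: Replaces A's single element-by-element running-max scan (with a manual row counter and per-element url updates) by a two-pass decomposition: a precomputed table of per-row maxima followed by one enumerate pass that selects the last row whose maximum strictly increases the running maximum.
import Mathlib
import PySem

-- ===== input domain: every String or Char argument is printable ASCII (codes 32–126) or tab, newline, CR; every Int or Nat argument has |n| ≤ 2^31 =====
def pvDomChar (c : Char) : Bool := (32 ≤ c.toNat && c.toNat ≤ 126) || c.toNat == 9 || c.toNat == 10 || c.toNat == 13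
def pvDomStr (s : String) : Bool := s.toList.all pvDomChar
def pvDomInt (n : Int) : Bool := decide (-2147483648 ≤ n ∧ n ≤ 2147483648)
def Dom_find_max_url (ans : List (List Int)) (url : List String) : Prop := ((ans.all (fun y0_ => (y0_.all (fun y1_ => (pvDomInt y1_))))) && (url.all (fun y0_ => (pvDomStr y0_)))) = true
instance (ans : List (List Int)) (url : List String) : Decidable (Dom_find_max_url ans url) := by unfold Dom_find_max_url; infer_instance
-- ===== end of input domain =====

-- B replaces A's element-by-element running-max scan by a per-row-maxima table plus one
-- selection pass over it (alternative decomposition, same cost, same return value).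

-- ===== PORT A =====
-- literal port of A: state (mx, count, url_ans); url[count] is read exactly where Python
-- reads it (pyGetD with default "" — inputs where Python would raise IndexError are
-- excluded by Pre_find_max_url below).
def find_max_url (ans : List (List Int)) (url : List String) : Int × String :=
  let st := ans.foldl (fun (s : Int × Int × String) x =>
      let count := s.2.1 + 1
      let inner := x.foldl (fun (p : Int × String) y =>
          if p.1 < y then (y, PySem.List.pyGetD url count "") else p) (s.1, s.2.2)
      (inner.1, count, inner.2)) (0, -1, "")
  (st.1, st.2.2)

-- ===== PORT B =====
def find_max_url_alt (ans : List (List Int)) (url : List String) : Int × String :=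
  let row_max := ans.map (fun row => (PySem.List.max? row (fun y => y)).getD 0)
  (PySem.List.enumerate row_max 0).foldl (fun (p : Int × String) im =>
      if p.1 < im.2 then (im.2, PySem.List.pyGetD url im.1 "") else p) (0, "")

-- ===== PRECONDITION & SPEC =====
-- Pre_ excludes exactly the inputs on which Python A raises IndexError: some element in a
-- row at index ≥ len(url) strictly exceeds the running maximum accumulated over the first
-- len(url) rows (so url[count] is read out of range). A returns normally everywhere else.
def Pre_find_max_url (ans : List (List Int)) (url : List String) : Prop :=
  ∀ y ∈ (ans.drop url.length).flatten, y ≤ ((ans.take url.length).flatten).foldl max 0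
instance (ans : List (List Int)) (url : List String) : Decidable (Pre_find_max_url ans url) := by unfold Pre_find_max_url; infer_instance
def pvWitness_find_max_url : List (List Int) × List String := ([[1, 5], [3], []], ["a", "b", "c"])
def Spec_find_max_url (ans : List (List Int)) (url : List String) (out : Int × String) : Prop := out = find_max_url_alt ans url
instance (ans : List (List Int)) (url : List String) (out : Int × String) : Decidable (Spec_find_max_url ans url out) := by unfold Spec_find_max_url; infer_instance

-- ===== CLAIM (what is proved, stated in full; the proofs are below) =====
def Claim_equal_find_max_url : Prop := ∀ (ans : List (List Int)) (url : List String), Dom_find_max_url ans url → Pre_find_max_url ans url → Spec_find_max_url ans url (find_max_url ans url)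

-- ===== LEMMAS AND PROOFS =====

-- A's inner fold over one row: the running max becomes foldl max, and url_ans is
-- overwritten (by the row's constant url value u) iff the row raised the maximum.
theorem rowStep (x : List Int) (mx : Int) (ua u : String) :
    x.foldl (fun (p : Int × String) y => if p.1 < y then (y, u) else p) (mx, ua)
      = (x.foldl max mx, if mx < x.foldl max mx then u else ua) := by
  induction x generalizing mx ua with
  | nil => simp
  | cons y t ih =>
    by_cases h : mx < y
    · have hy : max mx y = y := by omega
      have hle : y ≤ t.foldl max y := (PySem.List.le_foldl_max t y).1
      simp only [List.foldl_cons, if_pos h, hy, ih]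
      have : mx < t.foldl max y := lt_of_lt_of_le h hle
      simp [this]
    · have hy : max mx y = mx := by omega
      simp [List.foldl_cons, if_neg h, hy, ih]

-- foldl max distributes over the initial max
theorem foldl_max_max (l : List Int) (a b : Int) :
    l.foldl max (max a b) = max a (l.foldl max b) := List.foldl_assoc

-- Main loop correspondence: A's row fold with counter starting at i-1 equals B's
-- enumerate fold starting at index i, for any nonnegative running max mx.
theorem mainLoop (url : List String) (ans : List (List Int)) :
    ∀ (i mx : Int) (ua : String), 0 ≤ mx →
      (let st := ans.foldl (fun (s : Int × Int × String) x =>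
          let count := s.2.1 + 1
          let inner := x.foldl (fun (p : Int × String) y =>
              if p.1 < y then (y, PySem.List.pyGetD url count "") else p) (s.1, s.2.2)
          (inner.1, count, inner.2)) (mx, i - 1, ua)
       (st.1, st.2.2))
      = (PySem.List.enumerate (ans.map (fun row => (PySem.List.max? row (fun y => y)).getD 0)) i).foldl
          (fun (p : Int × String) im =>
            if p.1 < im.2 then (im.2, PySem.List.pyGetD url im.1 "") else p) (mx, ua) := by
  induction ans with
  | nil => intro i mx ua _; simp
  | cons x t ih =>
    intro i mx ua hmx
    simp only [List.foldl_cons, List.map_cons, PySem.List.enumerate_cons]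
    rw [show i - 1 + 1 = i by ring, rowStep]
    cases x with
    | nil =>
      have h0 : ¬ (mx < (0 : Int)) := by omega
      have h1 := ih (i + 1) mx ua hmx
      rw [show i + 1 - 1 = i by ring] at h1
      simpa [PySem.List.max?, h0] using h1
    | cons y ys =>
      rw [PySem.List.max?_id_cons]
      simp only [List.foldl_cons, Option.getD_some, foldl_max_max]
      by_cases h : mx < ys.foldl max y
      · have hmax : max mx (ys.foldl max y) = ys.foldl max y := by omega
        rw [hmax]
        have h1 := ih (i + 1) (ys.foldl max y) (PySem.List.pyGetD url i "") (by omega)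
        rw [show i + 1 - 1 = i by ring] at h1
        simpa [h] using h1
      · have hmax : max mx (ys.foldl max y) = mx := by omega
        rw [hmax]
        have h1 := ih (i + 1) mx ua hmx
        rw [show i + 1 - 1 = i by ring] at h1
        simpa [h] using h1

-- ===== VERDICT (by name: the statement is the Claim_ definition above) =====
theorem find_max_url_spec : Claim_equal_find_max_url := by
  intro ans url _ _
  unfold Spec_find_max_url find_max_url find_max_url_alt
  simpa using mainLoop url ans 0 0 "" le_rfl
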